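-- pv_equiv track=rewrite | github.com/Guo749/EngineMatchingSystem | src/test/java/demo/IntegrationTest.py | processLines
-- ===== SOURCE A (Python) =====
-- def getAccountId(line):
--     j = 0
--     while line[j] != '"':
--         j += 1
--     accountId = ""
--     j += 1
--     while line[j] != '"':
--         accountId += str(line[j])
--         j += 1
--     return accountId
--
-- def processLines(lines, errorTest):
--     # this is what I expect
--     res = []
--     index = 0
--     balanceID   = "balance="
--     accountID   = "<account id="
--     symbolID    = "symbol sym"
--     endSymID    = "/symbol"
--     while index < len(lines):
--         if balanceID in lines[index]:
--             accountId = getAccountId(lines[index].strip())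
--
--             if errorTest:
--                 target = "<error id=\"" + str(accountId) + "\">Account already exists</error>"
--             else:
--                 target = "<created id=\"" + accountId + "\"/>"
--             res.append(target)
--
--         elif symbolID in lines[index] and not errorTest:
--             j = 0
--             while lines[index][j] != '"':
--                 j += 1
--             j += 1
--
--             symbol = ""
--             while lines[index][j] != '"':
--                 symbol += str(lines[index][j])
--                 j += 1
--
--             index += 1
--
--             while index < len(lines) and (endSymID not in lines[index]):
--                 line = lines[index].strip()
--                 if accountID in line:
--                     account = getAccountId(line)
--                     target = "<created sym=\"" + symbol + "\" id=\"" + account + "\"/>"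
--                     res.append(target)
--                 index += 1
--
--         index += 1
--
--     return res
-- ===== SOURCE B (Python) =====
-- def getAccountId(line):
--     j = 0
--     while line[j] != '"':
--         j += 1
--     accountId = ""
--     j += 1
--     while line[j] != '"':
--         accountId += str(line[j])
--         j += 1
--     return accountId
--
-- def processLines(lines, errorTest):
--     # flat state machine: one pass, a boolean block flag and the current symbol
--     res = []
--     in_block = False
--     symbol = ""
--     for raw in lines:
--         if in_block:
--             if "/symbol" in raw:
--                 in_block = False
--             elif "<account id=" in raw.strip():
--                 account = getAccountId(raw.strip())
--                 res.append("<created sym=\"" + symbol + "\" id=\"" + account + "\"/>")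
--         elif "balance=" in raw:
--             accountId = getAccountId(raw.strip())
--             if errorTest:
--                 res.append("<error id=\"" + accountId + "\">Account already exists</error>")
--             else:
--                 res.append("<created id=\"" + accountId + "\"/>")
--         elif "symbol sym" in raw and not errorTest:
--             symbol = getAccountId(raw)
--             in_block = True
--     return res
-- ===== Notes on version B (the rewrite author's own statement) =====
-- stated objective: simpler
-- what changed: A's nested while-loops (an outer index loop with an inner loop that consumes a whole symbol block, plus an inline char-scan duplicating getAccountId) are replaced by one flat for-loop over the lines driven by an in_block flag and the current symbol.
import Mathlib
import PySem

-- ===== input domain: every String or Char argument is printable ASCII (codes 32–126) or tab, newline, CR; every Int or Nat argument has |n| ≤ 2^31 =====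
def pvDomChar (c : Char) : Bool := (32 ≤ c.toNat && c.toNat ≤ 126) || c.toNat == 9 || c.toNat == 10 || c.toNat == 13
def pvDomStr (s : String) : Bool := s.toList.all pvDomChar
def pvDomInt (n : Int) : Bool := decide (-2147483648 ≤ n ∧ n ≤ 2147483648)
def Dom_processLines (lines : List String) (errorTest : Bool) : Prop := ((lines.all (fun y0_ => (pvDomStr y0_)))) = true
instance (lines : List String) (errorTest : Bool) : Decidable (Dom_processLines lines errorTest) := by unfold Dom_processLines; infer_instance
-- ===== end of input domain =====

-- B rewrites A's nested while-loops (outer index loop with an inner block-consuming loop)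
-- as one flat pass with an explicit in-block flag and current symbol (objective: simpler).

-- ===== PORT A =====
-- getAccountId: 'while line[j] != '"': j += 1' — drop up to and through the first quote
-- (where Python raises IndexError on a quoteless scanned line this returns the empty remainder; Pre_ excludes exactly those inputs)
def pvDropToQuote : List Char → List Char
  | [] => []
  | c :: t => if c = '"' then t else pvDropToQuote t

-- the second while: collect characters until the next quote
def pvTakeToQuote : List Char → List Char
  | [] => []
  | c :: t => if c = '"' then [] else c :: pvTakeToQuote t

def pvGetAccountId (line : String) : String :=
  String.mk (pvTakeToQuote (pvDropToQuote line.toList))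

-- A's inner while over the following lines until "/symbol": returns (appended entries, remaining lines after the block)
def pvABlock (symbol : String) : List String → List String × List String
  | [] => ([], [])
  | l :: rest =>
    if PySem.Str.isIn "/symbol" l then ([], rest)
    else
      let line := PySem.Str.strip l
      let p := pvABlock symbol rest
      if PySem.Str.isIn "<account id=" line then
        (("<created sym=\"" ++ symbol ++ "\" id=\"" ++ pvGetAccountId line ++ "\"/>") :: p.1, p.2)
      else p

theorem pvABlock_len (symbol : String) (ls : List String) :
    (pvABlock symbol ls).2.length ≤ ls.length := by
  induction ls with
  | nil => simp [pvABlock]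
  | cons l rest ih => simp only [pvABlock]; split_ifs <;> simp <;> omega

-- A's outer while over the index, as structural consumption of the line list
def pvAMain (errorTest : Bool) : List String → List String
  | [] => []
  | l :: rest =>
    if PySem.Str.isIn "balance=" l then
      (if errorTest then
         "<error id=\"" ++ pvGetAccountId (PySem.Str.strip l) ++ "\">Account already exists</error>"
       else
         "<created id=\"" ++ pvGetAccountId (PySem.Str.strip l) ++ "\"/>") :: pvAMain errorTest rest
    else if PySem.Str.isIn "symbol sym" l ∧ errorTest = false then
      -- inline symbol char-scan: same two while loops as getAccountId
      let symbol := String.mk (pvTakeToQuote (pvDropToQuote l.toList))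
      let p := pvABlock symbol rest
      p.1 ++ pvAMain errorTest p.2
    else pvAMain errorTest rest
  termination_by ls => ls.length
  decreasing_by
    · simp
    · have := pvABlock_len (String.mk (pvTakeToQuote (pvDropToQuote l.toList))) rest
      simp; omega
    · simp

def processLines (lines : List String) (errorTest : Bool) : List String :=
  pvAMain errorTest lines

-- ===== PORT B =====
-- one step of B's flat loop; state = (res, in_block, symbol)
def pvBStep (errorTest : Bool) (st : List String × Bool × String) (raw : String) :
    List String × Bool × String :=
  let res := st.1
  let inBlock := st.2.1
  let symbol := st.2.2
  if inBlock then
    if PySem.Str.isIn "/symbol" raw then (res, false, symbol)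
    else if PySem.Str.isIn "<account id=" (PySem.Str.strip raw) then
      (res ++ ["<created sym=\"" ++ symbol ++ "\" id=\"" ++
               pvGetAccountId (PySem.Str.strip raw) ++ "\"/>"], true, symbol)
    else st
  else if PySem.Str.isIn "balance=" raw then
    (res ++ [if errorTest then
               "<error id=\"" ++ pvGetAccountId (PySem.Str.strip raw) ++ "\">Account already exists</error>"
             else
               "<created id=\"" ++ pvGetAccountId (PySem.Str.strip raw) ++ "\"/>"], inBlock, symbol)
  else if PySem.Str.isIn "symbol sym" raw ∧ errorTest = false then
    (res, true, pvGetAccountId raw)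
  else st

def processLines_alt (lines : List String) (errorTest : Bool) : List String :=
  (lines.foldl (pvBStep errorTest) ([], false, "")).1

-- ===== PRECONDITION & SPEC =====
-- Pre_ excludes EXACTLY the inputs on which Python A raises IndexError: A's scan reaches a marker
-- line carrying fewer than two '"' characters, so getAccountId (or the inline symbol char-scan)
-- runs off the end of the string.  Which lines the scan reaches is an inherently sequential fact
-- (a balance/account line inside a symbol block is never scanned), so Pre_ is stated as the obvious
-- two-state recognizer of that crash set; it computes no output, only whether every scanned marker
-- line has its two quotes.  No input on which A returns a value is excluded.
def pvScanOK (errorTest : Bool) : Bool → List String → Bool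
  | _, [] => true
  | true, l :: rest =>
    if PySem.Str.isIn "/symbol" l then pvScanOK errorTest false rest
    else if PySem.Str.isIn "<account id=" (PySem.Str.strip l) then
      decide (2 ≤ PySem.Str.count l "\"") && pvScanOK errorTest true rest
    else pvScanOK errorTest true rest
  | false, l :: rest =>
    if PySem.Str.isIn "balance=" l then
      decide (2 ≤ PySem.Str.count l "\"") && pvScanOK errorTest false rest
    else if PySem.Str.isIn "symbol sym" l && !errorTest then
      decide (2 ≤ PySem.Str.count l "\"") && pvScanOK errorTest true rest
    else pvScanOK errorTest false rest

def Pre_processLines (lines : List String) (errorTest : Bool) : Prop :=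
  pvScanOK errorTest false lines = true
instance (lines : List String) (errorTest : Bool) : Decidable (Pre_processLines lines errorTest) := by
  unfold Pre_processLines; infer_instance

def pvWitness_processLines : List String × Bool :=
  (["<account id=\"7\" balance=\"100\">", "<symbol sym=\"SPY\">", "  <account id=\"7\"/>", "</symbol>"], false)

def Spec_processLines (lines : List String) (errorTest : Bool) (out : List String) : Prop :=
  out = processLines_alt lines errorTest
instance (lines : List String) (errorTest : Bool) (out : List String) :
    Decidable (Spec_processLines lines errorTest out) := by
  unfold Spec_processLines; infer_instance

-- ===== CLAIM (what is proved, stated in full; the proofs are below) =====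
def Claim_equal_processLines : Prop :=
  ∀ (lines : List String) (errorTest : Bool), Dom_processLines lines errorTest →
    Pre_processLines lines errorTest →
    Spec_processLines lines errorTest (processLines lines errorTest)

-- ===== LEMMAS AND PROOFS =====

-- inside a block, folding B's step until the block ends accumulates exactly A's block entries,
-- and leaves B at (res ++ entries, not-in-block, same symbol) on A's remaining lines
theorem pvFold_block (e : Bool) (sym : String) (ls : List String) :
    ∀ res : List String,
      (ls.foldl (pvBStep e) (res, true, sym)).1 =
      ((pvABlock sym ls).2.foldl (pvBStep e) (res ++ (pvABlock sym ls).1, false, sym)).1 := by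
  induction ls with
  | nil => intro res; simp [pvABlock]
  | cons l rest ih =>
    intro res
    by_cases h1 : PySem.Str.isIn "/symbol" l = true
    · simp at h1
      simp [List.foldl_cons, pvBStep, pvABlock, h1]
    · simp at h1
      by_cases h2 : PySem.Str.isIn "<account id=" (PySem.Str.strip l) = true
      · simp at h2
        simp only [List.foldl_cons]
        rw [show pvBStep e (res, true, sym) l =
              (res ++ ["<created sym=\"" ++ sym ++ "\" id=\"" ++
                       pvGetAccountId (PySem.Str.strip l) ++ "\"/>"], true, sym) from by
          simp [pvBStep, h1, h2]]
        rw [ih]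
        rw [show pvABlock sym (l :: rest) =
              (("<created sym=\"" ++ sym ++ "\" id=\"" ++
                pvGetAccountId (PySem.Str.strip l) ++ "\"/>") :: (pvABlock sym rest).1,
               (pvABlock sym rest).2) from by
          simp [pvABlock, h1, h2]]
        simp
      · simp at h2
        simp only [List.foldl_cons]
        rw [show pvBStep e (res, true, sym) l = (res, true, sym) from by
          simp [pvBStep, h1, h2]]
        rw [ih]
        rw [show pvABlock sym (l :: rest) = pvABlock sym rest from by
          simp [pvABlock, h1, h2]]

-- out of a block, folding B's step computes A's outer loop (strong induction on the line count,
-- since A's recursion skips over a whole block at once)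
theorem pvFold_main (e : Bool) :
    ∀ (n : Nat) (ls : List String), ls.length ≤ n → ∀ (res : List String) (sym : String),
      (ls.foldl (pvBStep e) (res, false, sym)).1 = res ++ pvAMain e ls := by
  intro n
  induction n with
  | zero =>
    intro ls hls res sym
    have : ls = [] := List.eq_nil_of_length_eq_zero (Nat.le_zero.mp hls)
    subst this; simp [pvAMain]
  | succ n ih =>
    intro ls hls res sym
    cases ls with
    | nil => simp [pvAMain]
    | cons l rest =>
      simp only [List.length_cons, Nat.succ_le_succ_iff] at hls
      by_cases h1 : PySem.Str.isIn "balance=" l = true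
      · simp at h1
        simp only [List.foldl_cons]
        rw [show pvBStep e (res, false, sym) l =
              (res ++ [if e then
                         "<error id=\"" ++ pvGetAccountId (PySem.Str.strip l) ++ "\">Account already exists</error>"
                       else
                         "<created id=\"" ++ pvGetAccountId (PySem.Str.strip l) ++ "\"/>"], false, sym) from by
          simp [pvBStep, h1]]
        rw [ih rest hls]
        rw [show pvAMain e (l :: rest) =
              (if e then
                 "<error id=\"" ++ pvGetAccountId (PySem.Str.strip l) ++ "\">Account already exists</error>"
               else
                 "<created id=\"" ++ pvGetAccountId (PySem.Str.strip l) ++ "\"/>") :: pvAMain e rest from by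
          simp only [pvAMain]
          rw [if_pos (by simpa using h1)]
          try simp [pvGetAccountId]]
        simp
      · simp at h1
        by_cases h2 : (PySem.Str.isIn "symbol sym" l = true ∧ e = false)
        · obtain ⟨h2a, h2e⟩ := h2
          simp at h2a
          subst h2e
          simp only [List.foldl_cons]
          rw [show pvBStep false (res, false, sym) l = (res, true, pvGetAccountId l) from by
            simp [pvBStep, h1, h2a]]
          rw [pvFold_block false (pvGetAccountId l) rest res]
          have hlen : (pvABlock (pvGetAccountId l) rest).2.length ≤ n :=
            le_trans (pvABlock_len _ rest) hls
          rw [ih _ hlen]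
          rw [show pvAMain false (l :: rest) =
                (pvABlock (pvGetAccountId l) rest).1 ++
                  pvAMain false (pvABlock (pvGetAccountId l) rest).2 from by
            simp only [pvAMain]
            rw [if_neg (by simpa using h1), if_pos (by constructor <;> simp [h2a])]
            try simp [pvGetAccountId]]
          simp
        · simp only [List.foldl_cons]
          rw [show pvBStep e (res, false, sym) l = (res, false, sym) from by
            simp [pvBStep, h1]
            intro ha
            rcases (not_and_or.mp h2) with hx | hx
            · exact absurd (by simpa using ha) hx
            · simp at hx; simp [hx]]
          rw [ih rest hls]
          rw [show pvAMain e (l :: rest) = pvAMain e rest from by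
            simp only [pvAMain]
            rw [if_neg (by simpa using h1), if_neg h2]]

-- ===== VERDICT (by name: the statement is the Claim_ definition above) =====
theorem processLines_spec : Claim_equal_processLines := by
  unfold Claim_equal_processLines
  intro lines errorTest _ _
  unfold Spec_processLines processLines processLines_alt
  rw [pvFold_main errorTest lines.length lines le_rfl [] ""]
  simp
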